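-- pv_equiv track=rewrite | github.com/Shlok-Ippala/Music-AI-3 | backend/music_theory.py | _parse_progression
-- ===== SOURCE A (Python) =====
-- CHORD_TYPES = {
--     "maj":   (0, 4, 7),
--     "min":   (0, 3, 7),
--     "maj7":  (0, 4, 7, 11),
--     "min7":  (0, 3, 7, 10),
--     "dom7":  (0, 4, 7, 10),
--     "dim":   (0, 3, 6),
--     "aug":   (0, 4, 8),
--     "sus2":  (0, 2, 7),
--     "sus4":  (0, 5, 7),
--     "min9":  (0, 3, 7, 10, 14),
--     "maj9":  (0, 4, 7, 11, 14),
--     "add9":  (0, 4, 7, 14),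
--     "6":     (0, 4, 7, 9),
--     "min6":  (0, 3, 7, 9),
-- }
--
-- def _parse_progression(prog_str: str) -> list[tuple[int, str]]:
--     """Parse a progression string like 'Dmaj7 | Bmin7 | Emin7 | Amaj7' into (root_semitone, quality) tuples."""
--     REVERSE_NOTE = {
--         "C": 0, "C#": 1, "Db": 1, "D": 2, "D#": 3, "Eb": 3,
--         "E": 4, "F": 5, "F#": 6, "Gb": 6, "G": 7, "G#": 8, "Ab": 8,
--         "A": 9, "A#": 10, "Bb": 10, "B": 11,
--     }
--     result = []
--     for chord_str in prog_str.split("|"):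
--         chord_str = chord_str.strip()
--         if not chord_str:
--             continue
--         # Extract note name (1-2 chars) and quality
--         if len(chord_str) > 1 and chord_str[1] in ("#", "b"):
--             note_name = chord_str[:2]
--             quality = chord_str[2:] or "maj"
--         else:
--             note_name = chord_str[0]
--             quality = chord_str[1:] or "maj"
--         root = REVERSE_NOTE.get(note_name, 0)
--         # Normalize quality
--         if quality not in CHORD_TYPES:
--             quality = "maj"
--         result.append((root, quality))
--     return result
-- ===== SOURCE B (Python) =====
-- # Single-pass tokenizer + arithmetic root computation (no reverse-note dict):
-- # base semitone from a 7-entry table indexed by letter, accidental shifts +-1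
-- # and is valid exactly when it lands on a black key.
--
-- _BASE = (9, 11, 0, 2, 4, 5, 7)          # semitone of A..G
-- _BLACK = (1, 3, 6, 8, 10)               # semitones that have sharp/flat names
-- _QUALITIES = ("maj", "min", "maj7", "min7", "dom7", "dim", "aug", "sus2",
--               "sus4", "min9", "maj9", "add9", "6", "min6")
--
--
-- def _root(note):
--     k = ord(note[0]) - 65
--     if not 0 <= k < 7:
--         return 0
--     r = _BASE[k]
--     if len(note) == 2:
--         r = r + 1 if note[1] == "#" else r - 1
--         if r not in _BLACK:
--             r = 0
--     return r
--
--
-- def _parse_chord(tok):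
--     # tok is a non-empty, already-stripped chord token
--     if tok[1:2] in ("#", "b"):
--         note, qual = tok[:2], tok[2:]
--     else:
--         note, qual = tok[:1], tok[1:]
--     return (_root(note), qual if qual in _QUALITIES else "maj")
--
--
-- def _parse_progression(prog_str: str) -> list[tuple[int, str]]:
--     """Scan characters once, flushing a chord buffer at each bar separator."""
--     result = []
--     buf = []
--     for ch in prog_str + "|":
--         if ch == "|":
--             tok = "".join(buf).strip()
--             buf = []
--             if tok:
--                 result.append(_parse_chord(tok))
--         else:
--             buf.append(ch)
--     return result
-- ===== Notes on version B (the rewrite author's own statement) =====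
-- stated objective: alternative
-- what changed: Replaces A's split/strip plus length-and-slice dissection and reverse-note dict with a single-pass character tokenizer that flushes a chord buffer at each bar separator, and an arithmetic root computation (7-entry base-semitone table indexed by letter code, accidental shifts the semitone by +/-1 and is valid exactly when it lands on a black key).
import Mathlib
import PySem

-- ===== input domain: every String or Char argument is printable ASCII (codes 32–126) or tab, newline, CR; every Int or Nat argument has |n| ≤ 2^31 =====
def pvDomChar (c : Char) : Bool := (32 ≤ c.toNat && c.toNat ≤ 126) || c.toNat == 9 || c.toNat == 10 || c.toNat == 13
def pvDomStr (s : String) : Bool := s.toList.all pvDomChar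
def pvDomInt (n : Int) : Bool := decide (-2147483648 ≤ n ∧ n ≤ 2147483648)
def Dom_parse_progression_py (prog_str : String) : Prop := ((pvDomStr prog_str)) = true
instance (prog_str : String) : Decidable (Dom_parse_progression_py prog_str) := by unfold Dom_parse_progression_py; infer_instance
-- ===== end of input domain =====

-- B replaces A's split/strip/slice dissection and reverse-note dict by a one-pass character
-- tokenizer plus an arithmetic root computation (7-entry base table, accidental shifts ±1,
-- valid iff it lands on a black key); same cost, different decomposition (objective: alternative).

-- ===== PORT A =====
def pvReverseNote : PySem.Dict String Int := PySem.Dict.ofList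
  [("C",0),("C#",1),("Db",1),("D",2),("D#",3),("Eb",3),
   ("E",4),("F",5),("F#",6),("Gb",6),("G",7),("G#",8),("Ab",8),
   ("A",9),("A#",10),("Bb",10),("B",11)]

def pvChordTypes : PySem.Dict String (List Int) := PySem.Dict.ofList
  [("maj",[0,4,7]),("min",[0,3,7]),("maj7",[0,4,7,11]),("min7",[0,3,7,10]),
   ("dom7",[0,4,7,10]),("dim",[0,3,6]),("aug",[0,4,8]),("sus2",[0,2,7]),
   ("sus4",[0,5,7]),("min9",[0,3,7,10,14]),("maj9",[0,4,7,11,14]),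
   ("add9",[0,4,7,14]),("6",[0,4,7,9]),("min6",[0,3,7,9])]

-- the body of A's for-loop, one chord string at a time
def pvBodyA (result : List (Int × String)) (chord0 : String) : List (Int × String) :=
  let chord := PySem.Str.strip chord0
  if chord = "" then result
  else
    let pair :=
      if PySem.Str.len chord > 1 ∧ (PySem.Str.pyGet? chord 1 = some '#' ∨ PySem.Str.pyGet? chord 1 = some 'b') then
        (PySem.Str.slice chord none (some 2),
         let q := PySem.Str.slice chord (some 2) none
         if q = "" then "maj" else q)
      else
        ((match PySem.Str.pyGet? chord 0 with | some c => String.ofList [c] | none => ""),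
         let q := PySem.Str.slice chord (some 1) none
         if q = "" then "maj" else q)
    let root := pvReverseNote.getD pair.1 0
    let quality := if pvChordTypes.contains pair.2 then pair.2 else "maj"
    result ++ [(root, quality)]

def parse_progression_py (prog_str : String) : List (Int × String) :=
  ((PySem.Str.split? prog_str "|").getD []).foldl pvBodyA []

-- ===== PORT B =====
def pvBase : List Int := [9, 11, 0, 2, 4, 5, 7]       -- semitone of A..G
def pvBlack : List Int := [1, 3, 6, 8, 10]            -- semitones with sharp/flat names
def pvQualities : List String :=
  ["maj", "min", "maj7", "min7", "dom7", "dim", "aug", "sus2",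
   "sus4", "min9", "maj9", "add9", "6", "min6"]

-- Source B's _root; only ever called with a 1- or 2-char note (the [] arm is a totality guard)
def pvRootAlt : List Char → Int
  | [] => 0
  | c :: rest =>
    let k : Int := (c.toNat : Int) - 65
    if ¬ (0 ≤ k ∧ k < 7) then 0
    else
      let r := (PySem.List.pyGet? pvBase k).getD 0
      match rest with
      | [h] =>
        let r' := if h = '#' then r + 1 else r - 1
        if pvBlack.contains r' then r' else 0
      | _ => r

-- Source B's _parse_chord; only ever called on a non-empty stripped token
def pvParseChordAlt (tok : List Char) : Int × String :=
  match tok with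
  | [] => (0, "maj")
  | c :: rest =>
    let p :=
      match rest with
      | h :: t => if h = '#' ∨ h = 'b' then ([c, h], t) else ([c], rest)
      | [] => ([c], ([] : List Char))
    let q := String.ofList p.2
    (pvRootAlt p.1, if pvQualities.contains q then q else "maj")

-- one character of Source B's scan: flush the buffer at a separator char, otherwise extend it
def pvAltStep (st : List (Int × String) × List Char) (ch : Char) : List (Int × String) × List Char :=
  if ch = '|' then
    let tok := PySem.Chars.strip st.2
    (if tok = [] then st.1 else st.1 ++ [pvParseChordAlt tok], [])
  else (st.1, st.2 ++ [ch])

def parse_progression_py_alt (prog_str : String) : List (Int × String) :=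
  ((prog_str.toList ++ ['|']).foldl pvAltStep ([], [])).1

-- ===== PRECONDITION & SPEC =====
def Spec_parse_progression_py (prog_str : String) (out : List (Int × String)) : Prop := out = parse_progression_py_alt prog_str
instance (prog_str : String) (out : List (Int × String)) : Decidable (Spec_parse_progression_py prog_str out) := by unfold Spec_parse_progression_py; infer_instance

-- ===== CLAIM (what is proved, stated in full; the proofs are below) =====
def Claim_equal_parse_progression_py : Prop := ∀ (prog_str : String), Dom_parse_progression_py prog_str → Spec_parse_progression_py prog_str (parse_progression_py prog_str)

-- ===== LEMMAS AND PROOFS =====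

-- reference splitter: split on '|' carrying the current piece directly
def pvSb : List Char → List Char → List (List Char)
  | [], cur => [cur]
  | c :: rest, cur => if c = '|' then cur :: pvSb rest [] else pvSb rest (cur ++ [c])

-- chord-level step, list side
def pvStepA (acc : List (Int × String)) (part : List Char) : List (Int × String) :=
  if PySem.Chars.strip part = [] then acc else acc ++ [pvParseChordAlt (PySem.Chars.strip part)]

theorem pvOfList_eq_empty (l : List Char) : (String.ofList l = "") ↔ l = [] := by
  rw [← String.toList_inj]; simp

theorem pvGo_eq (fuel : Nat) : ∀ (l cur : List Char) (acc : List (List Char)), l.length < fuel →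
    PySem.Chars.splitOn.go ['|'] fuel l cur acc = acc.reverse ++ pvSb l cur.reverse := by
  induction fuel with
  | zero => intro l cur acc h; omega
  | succ n ih =>
    intro l cur acc h
    cases l with
    | nil => rw [PySem.Chars.splitOn.go.eq_def]; simp [pvSb]
    | cons c rest =>
      have hred : PySem.Chars.splitOn.go ['|'] (n+1) (c :: rest) cur acc =
          (if ['|'].isPrefixOf (c :: rest) = true then
            PySem.Chars.splitOn.go ['|'] n (List.drop 1 (c :: rest)) [] (cur.reverse :: acc)
          else PySem.Chars.splitOn.go ['|'] n rest (c :: cur) acc) := by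
        rw [PySem.Chars.splitOn.go.eq_def]; rfl
      rw [hred]
      have hp : (['|'].isPrefixOf (c :: rest)) = ('|' == c) := by simp [List.isPrefixOf]
      by_cases hc : c = '|'
      · subst hc
        rw [hp, if_pos (by simp)]
        rw [ih _ _ _ (by simpa using Nat.lt_of_succ_lt_succ h)]
        simp [pvSb]
      · rw [hp, if_neg (by simpa using fun hh => absurd hh.symm hc)]
        rw [ih _ _ _ (by simpa using Nat.lt_of_succ_lt_succ h)]
        simp [pvSb, hc]

theorem pvSplitOn_eq (l : List Char) : PySem.Chars.splitOn l ['|'] = pvSb l [] := by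
  unfold PySem.Chars.splitOn
  rw [pvGo_eq (l.length + 1) l [] [] (by omega)]
  simp

theorem pvTok_eq : ∀ (cs : List Char) (acc : List (Int × String)) (buf : List Char),
    ((cs ++ ['|']).foldl pvAltStep (acc, buf)).1 = (pvSb cs buf).foldl pvStepA acc := by
  intro cs
  induction cs with
  | nil => intro acc buf; simp [pvAltStep, pvSb, pvStepA]
  | cons c rest ih =>
    intro acc buf
    by_cases hc : c = '|'
    · subst hc
      simp only [List.cons_append, List.foldl_cons, pvAltStep, pvSb]
      rw [ih]
      simp [pvStepA]
    · simp only [List.cons_append, List.foldl_cons, pvAltStep, if_neg hc]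
      rw [ih]
      simp [pvSb, hc]

-- a char is one of the 7 note letters iff its code is in [65, 72)
theorem pvChar_of_toNat (c : Char) (n : Nat) (h : c.toNat = n) : c = Char.ofNat n := by
  rw [← h, Char.ofNat_toNat]

set_option maxRecDepth 10000 in
theorem pvQual_eq (q : String) : pvChordTypes.contains q = pvQualities.contains q := by
  have h1 : pvChordTypes = PySem.Dict.mk
    [("maj",[0,4,7]),("min",[0,3,7]),("maj7",[0,4,7,11]),("min7",[0,3,7,10]),
     ("dom7",[0,4,7,10]),("dim",[0,3,6]),("aug",[0,4,8]),("sus2",[0,2,7]),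
     ("sus4",[0,5,7]),("min9",[0,3,7,10,14]),("maj9",[0,4,7,11,14]),
     ("add9",[0,4,7,14]),("6",[0,4,7,9]),("min6",[0,3,7,9])] := by decide
  rw [h1]
  simp only [PySem.Dict.contains_mk, pvQualities]
  rw [Bool.eq_iff_iff]; simp [@eq_comm String]

theorem pvLetter (c : Char) (hc : ¬ (c = 'A' ∨ c = 'B' ∨ c = 'C' ∨ c = 'D' ∨ c = 'E' ∨ c = 'F' ∨ c = 'G')) :
    ¬ (0 ≤ (c.toNat : Int) - 65 ∧ (c.toNat : Int) - 65 < 7) := by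
  rintro ⟨h1, h2⟩
  have h : c.toNat = 65 ∨ c.toNat = 66 ∨ c.toNat = 67 ∨ c.toNat = 68 ∨ c.toNat = 69 ∨ c.toNat = 70 ∨ c.toNat = 71 := by omega
  apply hc
  rcases h with h|h|h|h|h|h|h
  · exact Or.inl ((pvChar_of_toNat c _ h).trans (by decide))
  · exact Or.inr (Or.inl ((pvChar_of_toNat c _ h).trans (by decide)))
  · exact Or.inr (Or.inr (Or.inl ((pvChar_of_toNat c _ h).trans (by decide))))
  · exact Or.inr (Or.inr (Or.inr (Or.inl ((pvChar_of_toNat c _ h).trans (by decide)))))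
  · exact Or.inr (Or.inr (Or.inr (Or.inr (Or.inl ((pvChar_of_toNat c _ h).trans (by decide))))))
  · exact Or.inr (Or.inr (Or.inr (Or.inr (Or.inr (Or.inl ((pvChar_of_toNat c _ h).trans (by decide)))))))
  · exact Or.inr (Or.inr (Or.inr (Or.inr (Or.inr (Or.inr ((pvChar_of_toNat c _ h).trans (by decide)))))))

set_option maxRecDepth 10000 in
theorem pvRoot1 (c : Char) : pvReverseNote.getD (String.ofList [c]) 0 = pvRootAlt [c] := by
  by_cases hc : c = 'A' ∨ c = 'B' ∨ c = 'C' ∨ c = 'D' ∨ c = 'E' ∨ c = 'F' ∨ c = 'G'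
  · rcases hc with h|h|h|h|h|h|h <;> subst h <;> decide
  · have hk := pvLetter c hc
    have hrhs : pvRootAlt [c] = 0 := by
      simp only [pvRootAlt]
      rw [if_pos hk]
    rw [hrhs]
    push Not at hc
    obtain ⟨hA, hB, hC, hD, hE, hF, hG⟩ := hc
    have hmk : pvReverseNote = PySem.Dict.mk
      [("C",0),("C#",1),("Db",1),("D",2),("D#",3),("Eb",3),
       ("E",4),("F",5),("F#",6),("Gb",6),("G",7),("G#",8),("Ab",8),
       ("A",9),("A#",10),("Bb",10),("B",11)] := by decide
    have hcont : pvReverseNote.contains (String.ofList [c]) = false := by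
      rw [hmk, PySem.Dict.contains_mk]
      simp [← String.toList_inj]
      exact ⟨hC.symm, hD.symm, hE.symm, hF.symm, hG.symm, hA.symm, hB.symm⟩
    exact PySem.Dict.getD_of_not_contains _ _ hcont

set_option maxRecDepth 10000 in
theorem pvRoot2 (c h : Char) (hd : h = '#' ∨ h = 'b') :
    pvReverseNote.getD (String.ofList [c, h]) 0 = pvRootAlt [c, h] := by
  by_cases hc : c = 'A' ∨ c = 'B' ∨ c = 'C' ∨ c = 'D' ∨ c = 'E' ∨ c = 'F' ∨ c = 'G'
  · rcases hd with hh|hh <;> subst hh <;> rcases hc with h|h|h|h|h|h|h <;> subst h <;> decide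
  · have hk := pvLetter c hc
    have hrhs : pvRootAlt [c, h] = 0 := by
      simp only [pvRootAlt]
      rw [if_pos hk]
    rw [hrhs]
    push Not at hc
    obtain ⟨hA, hB, hC, hD, hE, hF, hG⟩ := hc
    have hmk : pvReverseNote = PySem.Dict.mk
      [("C",0),("C#",1),("Db",1),("D",2),("D#",3),("Eb",3),
       ("E",4),("F",5),("F#",6),("Gb",6),("G",7),("G#",8),("Ab",8),
       ("A",9),("A#",10),("Bb",10),("B",11)] := by decide
    have hcont : pvReverseNote.contains (String.ofList [c, h]) = false := by
      rw [hmk, PySem.Dict.contains_mk]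
      simp [← String.toList_inj, @eq_comm Char, hA, hB, hC, hD, hE, hF, hG]
    exact PySem.Dict.getD_of_not_contains _ _ hcont

set_option maxHeartbeats 2000000 in
theorem pvBody_eq (acc : List (Int × String)) (t : List Char) :
    pvBodyA acc (String.ofList t) = pvStepA acc t := by
  unfold pvBodyA pvStepA
  have hs : PySem.Str.strip (String.ofList t) = String.ofList (PySem.Chars.strip t) := by
    simp [PySem.Str.strip]
  rw [hs]
  generalize PySem.Chars.strip t = u
  have hofe : String.ofList ([] : List Char) = "" := by rw [pvOfList_eq_empty]
  cases u with
  | nil => simp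
  | cons c rest =>
    rw [if_neg (by simp)]
    cases rest with
    | nil =>
      rw [if_neg (by rintro ⟨h1, -⟩; simp [PySem.Str.len] at h1)]
      have hget0 : PySem.Str.pyGet? (String.ofList [c]) 0 = some c := by
        simp [PySem.Str.pyGet?, PySem.List.pyGet?, PySem.List.pyIdx?]
      have hq : PySem.Str.slice (String.ofList [c]) (some 1) none = String.ofList [] := by
        simp [PySem.Str.slice, PySem.List.slice, PySem.List.clampIdx]
      simp only [hget0, hq, hofe, pvParseChordAlt, pvRoot1, pvQual_eq]
      simp [pvQualities]
    | cons h tail =>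
      have hget1 : PySem.Str.pyGet? (String.ofList (c :: h :: tail)) 1 = some h := by
        simp [PySem.Str.pyGet?, PySem.List.pyGet?, PySem.List.pyIdx?]
      by_cases hd : h = '#' ∨ h = 'b'
      · rw [if_pos ⟨by simp [PySem.Str.len], by rw [hget1]; rcases hd with hd | hd <;> simp [hd]⟩]
        have hnote : PySem.Str.slice (String.ofList (c :: h :: tail)) none (some 2) = String.ofList [c, h] := by
          simp [PySem.Str.slice, PySem.List.slice, PySem.List.clampIdx]
        have hrest : PySem.Str.slice (String.ofList (c :: h :: tail)) (some 2) none = String.ofList tail := by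
          simp [PySem.Str.slice, PySem.List.slice, PySem.List.clampIdx]
        simp only [hnote, hrest, pvParseChordAlt, pvRoot2 c h hd, pvQual_eq, if_pos hd]
        cases tail with
        | nil =>
          simp only [hofe]
          simp [pvQualities]
        | cons q qs =>
          have hne : String.ofList (q :: qs) ≠ "" := by simp
          simp [hne]
      · rw [if_neg (by
          rintro ⟨-, hg | hg⟩ <;>
            (rw [hget1] at hg; exact hd (by cases hg; simp)))]
        have hget0 : PySem.Str.pyGet? (String.ofList (c :: h :: tail)) 0 = some c := by
          have hnn : (0:Int) ≤ (tail.length : Int) + 1 := by positivity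
          simp [PySem.Str.pyGet?, PySem.List.pyGet?, PySem.List.pyIdx?, hnn]
        have hq : PySem.Str.slice (String.ofList (c :: h :: tail)) (some 1) none = String.ofList (h :: tail) := by
          simp [PySem.Str.slice, PySem.List.slice, PySem.List.clampIdx]
        have hne : String.ofList (h :: tail) ≠ "" := by simp
        simp only [hget0, hq, pvRoot1, pvQual_eq, pvParseChordAlt, if_neg hd]
        simp [hne]

-- ===== VERDICT (by name: the statement is the Claim_ definition above) =====
theorem parse_progression_py_spec : Claim_equal_parse_progression_py := by
  intro s _
  unfold Spec_parse_progression_py parse_progression_py parse_progression_py_alt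
  have h1 : (PySem.Str.split? s "|").getD [] = (PySem.Chars.splitOn s.toList ['|']).map String.ofList := by
    simp [PySem.Str.split?, PySem.Chars.split?]
  have h2 : (fun (a : List (Int × String)) (t : List Char) => pvBodyA a (String.ofList t)) = pvStepA :=
    funext fun a => funext fun t => pvBody_eq a t
  rw [h1, pvSplitOn_eq, List.foldl_map, pvTok_eq, h2]
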